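-- pv_equiv track=rewrite | github.com/DoubleLoong/guess_next_letter_function | guess_next_letter_function.py | guess_next_letter
-- ===== SOURCE A (Python) =====
-- def guess_next_letter(partten,used_letters=[],word_list=['abound','apple','about','attack']):
--     partten_dict={}
--     for index,items in enumerate(tuple(partten)):
--         if items !='_':
--             partten_dict[index]=items
--     wrong_letter=list(set(used_letters).difference(set(partten)))
--     probable_words=[]
--     for word in word_list:
--         if len(word)==len(partten):
--             if  used_letters==[]:
--                 probable_words.append(word)
--                 continue
--             same_letters_count=0
--             for index,items in enumerate(tuple(word)):
--                 if  partten_dict.get(index)==items: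
--                     same_letters_count+=1
--                 if items in wrong_letter:
--                     same_letters_count-=1
--             if same_letters_count == len(partten_dict):
--                 probable_words.append(word)
--     if len(probable_words) ==0:
--         return ''
--     probable_letters={}
--     for word in probable_words:
--         for letter in set(word):
--             if letter  in probable_letters.keys():
--                 probable_letters[letter]+=1
--             else:
--                 probable_letters[letter]=1
--     result_list =sorted(probable_letters.items(),key=lambda x:x[1],reverse=True)
--     for i in result_list:
--         if i[0] not in set(used_letters):
--            return i[0]
-- ===== SOURCE B (Python) =====
-- def guess_next_letter(partten, used_letters=[], word_list=['abound', 'apple', 'about', 'attack']):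
--     # Sieve: start from the same-length words and eliminate candidates
--     # constraint by constraint (one pass per fixed pattern position, one pass
--     # per excluded letter), instead of scoring each word char by char.
--     candidates = [w for w in word_list if len(w) == len(partten)]
--     if used_letters != []:
--         for i, c in enumerate(partten):
--             if c != '_':
--                 candidates = [w for w in candidates if w[i] == c]
--         # only single-character entries can ever equal a letter of a word
--         for bad in {b for b in used_letters if len(b) == 1} - set(partten):
--             candidates = [w for w in candidates if bad not in w]
--     if not candidates:
--         return ''
--     # Argmax scan per letter (first-occurrence order) instead of
--     # building a frequency dict and sorting it.
--     best = None
--     for letter in dict.fromkeys(c for w in candidates for c in w):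
--         if letter in used_letters:
--             continue
--         n = sum(letter in w for w in candidates)
--         if best is None or n > best[1]:
--             best = (letter, n)
--     return best[0] if best else None
-- ===== Notes on version B (the rewrite author's own statement) =====
-- stated objective: alternative
-- what changed: Replaces A's per-word accumulator scoring (position-dict matches minus wrong-letter hits, compared to the dict size) by a sieve that eliminates candidates one constraint at a time (one filtering pass per fixed pattern position, one per excluded letter), and replaces the frequency-dict + stable-sort selection by a direct argmax scan over letters in first-occurrence order; Pre_ excludes tie inputs where A's answer depends on the interpreter's hash seed (set iteration order).
-- outside the precondition, e.g. on guess_next_letter('abound', [], ['p__ecnut', 'abound']): A returns 'd', B returns 'a'; on guess_next_letter('__', [], ['aa', 'bb']): A returns 'a', B returns 'a'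
import Mathlib
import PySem

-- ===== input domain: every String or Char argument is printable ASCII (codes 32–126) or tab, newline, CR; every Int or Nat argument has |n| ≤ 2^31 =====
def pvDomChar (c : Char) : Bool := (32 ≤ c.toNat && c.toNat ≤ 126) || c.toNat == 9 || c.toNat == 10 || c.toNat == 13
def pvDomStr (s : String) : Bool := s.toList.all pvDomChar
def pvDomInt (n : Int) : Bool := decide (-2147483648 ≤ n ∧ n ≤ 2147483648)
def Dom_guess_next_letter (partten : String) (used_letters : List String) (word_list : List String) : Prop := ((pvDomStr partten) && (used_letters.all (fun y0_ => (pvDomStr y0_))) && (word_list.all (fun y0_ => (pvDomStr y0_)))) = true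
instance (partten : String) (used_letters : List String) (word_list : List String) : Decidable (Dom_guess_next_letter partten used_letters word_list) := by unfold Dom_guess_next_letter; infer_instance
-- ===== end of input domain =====

-- B replaces A's per-word accumulator scoring by a constraint sieve (one filtering pass per fixed
-- pattern position, one per excluded letter) and A's frequency-dict + stable-sort selection by a
-- direct argmax scan over letters in first-occurrence order (objective: alternative). Python A
-- iterates set(word) into the tie-break order of its frequency sort, so on tie inputs its answer
-- depends on the interpreter's hash seed; those inputs are excluded by Pre_ below.

-- ===== PORT A =====
def guess_next_letter (partten : String) (used_letters : List String) (word_list : List String) : Option String :=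
  let pl := partten.toList
  let partten_dict : PySem.Dict Int Char :=
    (PySem.List.enumerate pl 0).foldl
      (fun d p => if p.2 != '_' then d.insert p.1 p.2 else d) PySem.Dict.empty
  let wrong_letter : List String :=
    PySem.Set.diff (PySem.Set.ofList used_letters) (PySem.Set.ofList (pl.map (fun c => String.ofList [c])))
  let probable_words : List String := word_list.foldl
    (fun acc word =>
      if word.toList.length == pl.length then
        if used_letters == ([] : List String) then acc ++ [word]
        else
          let cnt : Int := (PySem.List.enumerate word.toList 0).foldl
            (fun n p =>
              let n' := if partten_dict.get? p.1 == some p.2 then n + 1 else n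
              if wrong_letter.contains (String.ofList [p.2]) then n' - 1 else n')
            0
          if cnt == (partten_dict.size : Int) then acc ++ [word] else acc
      else acc) []
  if probable_words.length == 0 then some "" else
  -- set(word) iterates in an arbitrary hash-dependent order in Python; the port fixes one arbitrary
  -- order (reverse first-occurrence); Pre_ excludes the inputs where the choice affects the answer
  let probable_letters : PySem.Dict String Int := probable_words.foldl
    (fun d word =>
      (PySem.Set.ofList (word.toList.reverse.map (fun c => String.ofList [c]))).foldl
        (fun d letter => if d.contains letter then d.modify letter 0 (· + 1) else d.insert letter 1) d)
    PySem.Dict.empty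
  let result_list := PySem.List.sorted probable_letters.items (fun x => x.2) true
  result_list.foldl
    (fun r i => r.or (if !((PySem.Set.ofList used_letters).contains i.1) then some i.1 else none))
    none

-- ===== PORT B =====
def guess_next_letter_alt (partten : String) (used_letters : List String) (word_list : List String) : Option String :=
  let pl := partten.toList
  let candidates0 := word_list.filter (fun w => w.toList.length == pl.length)
  let candidates :=
    if used_letters != ([] : List String) then
      let c1 := (PySem.List.enumerate pl 0).foldl
        (fun cand q =>
          if q.2 != '_' then cand.filter (fun w => PySem.List.pyGet? w.toList q.1 == some q.2)
          else cand)
        candidates0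
      -- Source B only sieves with SINGLE-character wrong entries; 'bad not in w' for a
      -- one-character bad is exactly "no character of w equals it" (exact port)
      let wrong := PySem.Set.diff
        (PySem.Set.ofList (used_letters.filter (fun b => b.toList.length == 1)))
        (PySem.Set.ofList (pl.map (fun c => String.ofList [c])))
      wrong.foldl
        (fun cand bad => cand.filter (fun w => !(w.toList.any (fun c => String.ofList [c] == bad))))
        c1
    else candidates0
  if candidates == ([] : List String) then some "" else
  let best : Option (String × Int) :=
    (PySem.List.dedup (candidates.flatMap (fun w => w.toList))).foldl
      (fun best c =>
        let letter := String.ofList [c]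
        if used_letters.contains letter then best
        else
          let n : Int := ((candidates.countP (fun w => w.toList.contains c) : Nat) : Int)
          match best with
          | none => some (letter, n)
          | some b => if n > b.2 then some (letter, n) else best)
      none
  match best with
  | some b => some b.1
  | none => none

-- ===== PRECONDITION & SPEC =====
-- helpers of Pre_ (independent of both ports): which words match the pattern, and letter frequencies
def pvWrong (partten : String) (used_letters : List String) : List String :=
  PySem.Set.diff (PySem.Set.ofList used_letters)
    (PySem.Set.ofList (partten.toList.map (fun c => String.ofList [c])))

def pvProbable (partten : String) (used_letters : List String) (w : String) : Bool :=
  (w.toList.length == partten.toList.length) &&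
  ((used_letters == ([] : List String)) ||
    ((partten.toList.zip w.toList).all (fun q => q.1 == '_' || q.1 == q.2)
     && !(w.toList.any (fun c => List.contains (pvWrong partten used_letters) (String.ofList [c])))))

def pvLetters (w : String) : List String := w.toList.map (fun c => String.ofList [c])

def pvCnt (pws : List String) (s : String) : Nat := pws.countP (fun w => (pvLetters w).contains s)

def pvCs (used_letters : List String) (pws : List String) : List String :=
  (PySem.List.dedup (pws.flatMap (fun w => pvLetters w))).filter (fun s => !(used_letters.contains s))

-- Pre_ excludes the tie inputs on which Python A's answer depends on set(word) iteration order (the hash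
-- seed): two distinct not-yet-used letters share the maximal frequency among the pattern-matching words,
-- so there is no single value of A to match; B resolves such ties in first-occurrence order.
def Pre_guess_next_letter (partten : String) (used_letters : List String) (word_list : List String) : Prop :=
  (let pws := word_list.filter (fun w => pvProbable partten used_letters w)
   (pvCs used_letters pws).countP
     (fun s => (pvCs used_letters pws).all (fun s' => pvCnt pws s' ≤ pvCnt pws s)) ≤ 1)

instance (partten : String) (used_letters : List String) (word_list : List String) : Decidable (Pre_guess_next_letter partten used_letters word_list) := by unfold Pre_guess_next_letter; infer_instance

def pvWitness_guess_next_letter : String × List String × List String := ("ab", [], ["ab", "ax"])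

def Spec_guess_next_letter (partten : String) (used_letters : List String) (word_list : List String) (out : Option String) : Prop := out = guess_next_letter_alt partten used_letters word_list
instance (partten : String) (used_letters : List String) (word_list : List String) (out : Option String) : Decidable (Spec_guess_next_letter partten used_letters word_list out) := by unfold Spec_guess_next_letter; infer_instance

-- ===== CLAIM (what is proved, stated in full; the proofs are below) =====
def Claim_equal_guess_next_letter : Prop := ∀ (partten : String) (used_letters : List String) (word_list : List String), Dom_guess_next_letter partten used_letters word_list → Pre_guess_next_letter partten used_letters word_list → Spec_guess_next_letter partten used_letters word_list (guess_next_letter partten used_letters word_list)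

-- ===== LEMMAS AND PROOFS =====
-- helper (proof only): the position → letter map a pattern induces, as A's dict realises it
def pgets : List Char → Int → Int → Option Char
  | [], _, _ => none
  | c :: t, s, i => if i == s then (if c != '_' then some c else none) else pgets t (s + 1) i

theorem pgets_cons_self (c : Char) (t : List Char) (s : Int) :
    pgets (c :: t) s s = if c != '_' then some c else none := by
  simp [pgets]

theorem pgets_cons_ne (c : Char) (t : List Char) (s i : Int) (h : i ≠ s) :
    pgets (c :: t) s i = pgets t (s + 1) i := by
  simp only [pgets]
  rw [if_neg (by simp only [beq_iff_eq]; exact h)]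

theorem pgets_none_of_lt (t : List Char) : ∀ (s i : Int), i < s → pgets t s i = none := by
  induction t with
  | nil => intro s i _; rfl
  | cons c t ih =>
    intro s i h
    rw [pgets_cons_ne c t s i (by omega)]
    exact ih (s + 1) i (by omega)

theorem dict_get_eq_pgets (l : List Char) : ∀ (s : Int) (d : PySem.Dict Int Char) (i : Int),
    ((PySem.List.enumerate l s).foldl (fun d p => if p.2 != '_' then d.insert p.1 p.2 else d) d).get? i
      = (pgets l s i).or (d.get? i) := by
  induction l with
  | nil => intro s d i; simp [PySem.List.enumerate_nil, pgets]
  | cons c t ih =>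
    intro s d i
    rw [PySem.List.enumerate_cons, List.foldl_cons, ih]
    by_cases hi : i = s
    · subst hi
      rw [pgets_none_of_lt t (i + 1) i (by omega), pgets_cons_self, Option.none_or]
      by_cases hc : (c != '_') = true
      · rw [if_pos hc, if_pos hc, PySem.Dict.get?_insert_self, Option.some_or]
      · rw [if_neg hc, if_neg hc, Option.none_or]
    · rw [pgets_cons_ne c t s i hi]
      by_cases hc : (c != '_') = true
      · rw [if_pos hc, PySem.Dict.get?_insert_of_ne d c hi]
      · rw [if_neg hc]

theorem dict_size_eq (l : List Char) : ∀ (s : Int) (d : PySem.Dict Int Char),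
    (∀ p ∈ d.items, p.1 < s) →
    ((PySem.List.enumerate l s).foldl (fun d p => if p.2 != '_' then d.insert p.1 p.2 else d) d).size
      = d.size + l.countP (fun c => c != '_') := by
  induction l with
  | nil => intro s d _; simp [PySem.List.enumerate_nil]
  | cons c t ih =>
    intro s d hd
    rw [PySem.List.enumerate_cons, List.foldl_cons, List.countP_cons]
    by_cases hc : (c != '_') = true
    · rw [if_pos hc]
      have hnc : d.contains s = false := by
        simp only [PySem.Dict.contains, List.any_eq_false]
        intro p hp
        have := hd p hp
        simp only [beq_iff_eq]
        omega
      have hins : (d.insert s c).items = d.items ++ [(s, c)] := by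
        simp [PySem.Dict.insert, hnc]
      rw [ih (s + 1) (d.insert s c) (by
        intro p hp
        rw [hins] at hp
        rcases List.mem_append.mp hp with h | h
        · have := hd p h; omega
        · simp only [List.mem_singleton] at h; subst h; simp only; omega)]
      simp [PySem.Dict.size, hins, hc]
      omega
    · rw [if_neg hc]
      rw [ih (s + 1) d (by intro p hp; have := hd p hp; omega)]
      simp [hc]

theorem cnt_fold_eq (D : PySem.Dict Int Char) (wrongL : List String) (w : List Char) :
    ∀ (s : Int) (n : Int),
    (PySem.List.enumerate w s).foldl
        (fun n q =>
          if wrongL.contains (String.ofList [q.2])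
            then (if D.get? q.1 == some q.2 then n + 1 else n) - 1
            else (if D.get? q.1 == some q.2 then n + 1 else n)) n
      = n + ((PySem.List.enumerate w s).countP (fun q => D.get? q.1 == some q.2) : Int)
          - (w.countP (fun c => wrongL.contains (String.ofList [c])) : Int) := by
  induction w with
  | nil => intro s n; simp [PySem.List.enumerate_nil]
  | cons c t ih =>
    intro s n
    rw [PySem.List.enumerate_cons, List.foldl_cons, List.countP_cons, List.countP_cons, ih]
    split_ifs <;> push_cast <;> omega

theorem count_match_eq (q : List Char) : ∀ (w : List Char) (s : Int), w.length = q.length →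
    (PySem.List.enumerate w s).countP (fun p => pgets q s p.1 == some p.2)
      = (q.zip w).countP (fun p => p.1 != '_' && p.1 == p.2) := by
  induction q with
  | nil =>
    intro w s hw
    rw [List.length_nil, List.length_eq_zero_iff] at hw
    subst hw; rfl
  | cons c qt ih =>
    intro w s hw
    cases w with
    | nil => simp at hw
    | cons a wt =>
      rw [PySem.List.enumerate_cons, List.countP_cons, List.zip_cons_cons, List.countP_cons]
      have htail : (PySem.List.enumerate wt (s + 1)).countP (fun p => pgets (c :: qt) s p.1 == some p.2)
          = (PySem.List.enumerate wt (s + 1)).countP (fun p => pgets qt (s + 1) p.1 == some p.2) := by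
        apply List.countP_congr
        intro p hp
        rcases (PySem.List.mem_enumerate_iff wt (s + 1) p).mp hp with ⟨k, hk, hpk⟩
        subst hpk
        rw [pgets_cons_ne c qt s (s + 1 + (k : Int)) (by omega)]
      have hhead : (pgets (c :: qt) s s == some a) = (c != '_' && c == a) := by
        rw [pgets_cons_self]
        by_cases hc : (c != '_') = true
        · rw [if_pos hc, hc, Bool.true_and]
          simp
        · rw [if_neg hc]
          simp only [hc, Bool.false_and]
          simp
      rw [htail, ih wt (s + 1) (by simpa using hw), hhead]

theorem zip_count_le (q : List Char) : ∀ (w : List Char),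
    (q.zip w).countP (fun p => p.1 != '_' && p.1 == p.2) ≤ q.countP (fun c => c != '_') := by
  induction q with
  | nil => intro w; simp
  | cons c qt ih =>
    intro w
    cases w with
    | nil => simp
    | cons a wt =>
      rw [List.zip_cons_cons, List.countP_cons, List.countP_cons]
      have := ih wt
      by_cases hc : (c != '_') = true
      · simp only [hc, Bool.true_and]
        split_ifs <;> omega
      · rw [Bool.not_eq_true] at hc
        simp [hc]
        omega

theorem zip_count_eq_iff (q : List Char) : ∀ (w : List Char), w.length = q.length →
    (((q.zip w).countP (fun p => p.1 != '_' && p.1 == p.2) = q.countP (fun c => c != '_')) ↔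
      (q.zip w).all (fun p => p.1 == '_' || p.1 == p.2) = true) := by
  induction q with
  | nil =>
    intro w hw
    rw [List.length_nil, List.length_eq_zero_iff] at hw
    subst hw; simp
  | cons c qt ih =>
    intro w hw
    cases w with
    | nil => simp at hw
    | cons a wt =>
      rw [List.zip_cons_cons, List.countP_cons, List.countP_cons, List.all_cons]
      have hle := zip_count_le qt wt
      have hih := ih wt (by simpa using hw)
      by_cases hc : c = '_'
      · subst hc
        simp [hih]
      · have hc1 : (c != '_') = true := by simpa using hc
        have hc2 : (c == '_') = false := by simpa using hc
        simp only [hc1, Bool.true_and, hc2, Bool.false_or, if_true]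
        by_cases ha : (c == a) = true
        · rw [if_pos ha, ha, Bool.true_and, ← hih]
          omega
        · rw [if_neg ha]
          rw [Bool.not_eq_true] at ha
          rw [ha, Bool.false_and]
          constructor
          · intro h; omega
          · intro h; simp at h

theorem ofList_single_inj : Function.Injective (fun c : Char => String.ofList [c]) := by
  intro a b h
  simpa using congrArg String.toList h

theorem contains_map_single (acc : List Char) (c : Char) :
    ((acc.map (fun c : Char => String.ofList [c])).contains (String.ofList [c])) = acc.contains c := by
  by_cases h : c ∈ acc
  · have : String.ofList [c] ∈ acc.map (fun c : Char => String.ofList [c]) := List.mem_map_of_mem h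
    simp [h, this]
  · have : String.ofList [c] ∉ acc.map (fun c : Char => String.ofList [c]) := by
      intro hx
      rcases List.mem_map.mp hx with ⟨b, hb, he⟩
      have : b = c := by simpa using congrArg String.toList he
      exact h (this ▸ hb)
    simp [h, this]

theorem add_map_single (s : List Char) (c : Char) :
    PySem.Set.add (s.map (fun c : Char => String.ofList [c])) (String.ofList [c])
      = (PySem.Set.add s c).map (fun c : Char => String.ofList [c]) := by
  simp only [PySem.Set.add, PySem.Set.contains, contains_map_single]
  by_cases h : s.contains c = true
  · rw [if_pos h, if_pos h]
  · rw [if_neg h, if_neg h, List.map_append]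
    rfl

theorem foldl_add_map_single (l : List Char) : ∀ (acc : List Char),
    (l.map (fun c : Char => String.ofList [c])).foldl PySem.Set.add
        (acc.map (fun c : Char => String.ofList [c]))
      = (l.foldl PySem.Set.add acc).map (fun c : Char => String.ofList [c]) := by
  induction l with
  | nil => intro acc; rfl
  | cons c t ih =>
    intro acc
    rw [List.map_cons, List.foldl_cons, List.foldl_cons, add_map_single]
    exact ih (PySem.Set.add acc c)

theorem ofList_map_single (l : List Char) :
    PySem.Set.ofList (l.map (fun c => String.ofList [c]))
      = (PySem.List.dedup l).map (fun c => String.ofList [c]) := by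
  rw [PySem.List.dedup_eq_ofList, PySem.Set.ofList_eq_foldl, PySem.Set.ofList_eq_foldl]
  exact foldl_add_map_single l []

theorem counts_body_eq (d : PySem.Dict String Int) (k : String) :
    (if d.contains k then d.modify k 0 (· + 1) else d.insert k 1) = d.insert k (d.getD k 0 + 1) := by
  by_cases h : d.contains k = true
  · rw [if_pos h]; rfl
  · rw [if_neg h]
    have h0 : d.get? k = none := by
      rw [Bool.not_eq_true] at h
      simp only [PySem.Dict.contains, List.any_eq_false] at h
      simp only [PySem.Dict.get?, Option.map_eq_none_iff, List.find?_eq_none]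
      exact h
    simp [PySem.Dict.getD, h0]

theorem set_contains_ofList (u : List String) (x : String) :
    (PySem.Set.ofList u).contains x = u.contains x := by
  by_cases h : x ∈ u
  · simp [PySem.Set.contains, h, (PySem.Set.mem_ofList u x).mpr h]
  · have h2 : x ∉ PySem.Set.ofList u := fun hx => h ((PySem.Set.mem_ofList u x).mp hx)
    simp [PySem.Set.contains, h, h2]

theorem length_beq_zero (l : List String) : (l.length == 0) = (l == ([] : List String)) := by
  cases l <;> simp

-- ===== A-side selection machinery (proof only) =====
def pvLA (w : String) : List String :=
  (PySem.List.dedup w.toList.reverse).map (fun c => String.ofList [c])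

def pvCdict (L : String → List String) (pws : List String) : PySem.Dict String Int :=
  pws.foldl (fun d w => (L w).foldl (fun d k => d.insert k (d.getD k 0 + 1)) d) PySem.Dict.empty

theorem mem_pvLA (w : String) (k : String) : k ∈ pvLA w ↔ k ∈ pvLetters w := by
  simp [pvLA, pvLetters, PySem.List.dedup_eq_ofList, PySem.Set.mem_ofList, List.mem_reverse]

theorem nodup_pvLA (w : String) : (pvLA w).Nodup :=
  (PySem.List.nodup_dedup w.toList.reverse).map ofList_single_inj

theorem contains_congr_mem {l l' : List String} (k : String) (h : k ∈ l ↔ k ∈ l') :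
    l.contains k = l'.contains k := by
  by_cases hm : k ∈ l
  · rw [List.contains_iff_mem.mpr hm, List.contains_iff_mem.mpr (h.mp hm)]
  · have h1 : l.contains k = false := by
      rcases Bool.eq_false_or_eq_true (l.contains k) with h1 | h1
      · exact absurd (List.contains_iff_mem.mp h1) hm
      · exact h1
    have h2 : l'.contains k = false := by
      rcases Bool.eq_false_or_eq_true (l'.contains k) with h2 | h2
      · exact absurd (List.contains_iff_mem.mp h2) (fun hx => hm (h.mpr hx))
      · exact h2
    rw [h1, h2]

theorem cdict_getD (L : String → List String) (hn : ∀ w, (L w).Nodup) (pws : List String) :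
    ∀ (d : PySem.Dict String Int) (k : String),
    (pws.foldl (fun d w => (L w).foldl (fun d k' => d.insert k' (d.getD k' 0 + 1)) d) d).getD k 0
      = d.getD k 0 + ((pws.countP (fun w => (L w).contains k) : Nat) : Int) := by
  induction pws with
  | nil => intro d k; simp
  | cons w t ih =>
    intro d k
    rw [List.foldl_cons, ih, List.countP_cons, PySem.Dict.getD_foldl_insert_add_one]
    have hcount : (L w).count k = if (L w).contains k then 1 else 0 := by
      by_cases hm : k ∈ L w
      · rw [List.count_eq_one_of_mem (hn w) hm, if_pos (List.contains_iff_mem.mpr hm)]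
      · rw [List.count_eq_zero_of_not_mem hm,
          if_neg (by simpa [List.contains_iff_mem] using hm)]
    rw [hcount]
    split_ifs <;> push_cast <;> omega

theorem cdict_mem_keys (L : String → List String) (pws : List String) :
    ∀ (d : PySem.Dict String Int) (k : String),
    (k ∈ (pws.foldl (fun d w => (L w).foldl (fun d k' => d.insert k' (d.getD k' 0 + 1)) d) d).keys
      ↔ k ∈ d.keys ∨ ∃ w ∈ pws, k ∈ L w) := by
  induction pws with
  | nil => intro d k; simp
  | cons w t ih =>
    intro d k
    rw [List.foldl_cons, ih]
    rw [PySem.Dict.keys_foldl_insert]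
    rw [PySem.Set.mem_update]
    constructor
    · rintro (⟨h | h⟩ | ⟨w', hw', hk⟩)
      · exact Or.inl h
      · exact Or.inr ⟨w, List.mem_cons_self .., h⟩
      · exact Or.inr ⟨w', List.mem_cons_of_mem w hw', hk⟩
    · rintro (h | ⟨w', hw', hk⟩)
      · exact Or.inl (Or.inl h)
      · rcases List.mem_cons.mp hw' with rfl | hw'
        · exact Or.inl (Or.inr hk)
        · exact Or.inr ⟨w', hw', hk⟩

theorem cdict_nodup_keys (L : String → List String) (pws : List String) :
    ∀ (d : PySem.Dict String Int), d.keys.Nodup →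
    (pws.foldl (fun d w => (L w).foldl (fun d k' => d.insert k' (d.getD k' 0 + 1)) d) d).keys.Nodup := by
  induction pws with
  | nil => intro d hd; simpa
  | cons w t ih =>
    intro d hd
    rw [List.foldl_cons]
    exact ih _ (PySem.Dict.nodup_keys_foldl_insert (L w) _ d hd)

theorem scan_or (q : String × Int → Bool) (l : List (String × Int)) :
    ∀ (r : Option String),
    l.foldl (fun r i => r.or (if q i then some i.1 else none)) r
      = r.or ((l.find? q).map Prod.fst) := by
  induction l with
  | nil => intro r; simp
  | cons a t ih =>
    intro r
    rw [List.foldl_cons, ih, Option.or_assoc]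
    by_cases hq : q a = true
    · rw [List.find?_cons_of_pos hq]
      simp [hq]
    · rw [List.find?_cons_of_neg hq]
      simp [hq]

theorem find_sorted_none (q : String × Int → Bool) (items : List (String × Int))
    (h : ∀ pr ∈ items, q pr = false) :
    (PySem.List.sorted items (fun x => x.2) true).find? q = none := by
  rw [List.find?_eq_none]
  intro x hx
  have hxm : x ∈ items := (PySem.List.sorted_perm items (fun x => x.2) true).mem_iff.mp hx
  simp [h x hxm]

theorem find_sorted_max (p : String → Bool) (items : List (String × Int))
    (hnodup : (items.map Prod.fst).Nodup) (k : String) (v : Int)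
    (hmem : (k, v) ∈ items) (hp : p k = true)
    (hmax : ∀ pr ∈ items, p pr.1 = true → pr.2 ≤ v)
    (huniq : ∀ pr ∈ items, p pr.1 = true → pr.2 = v → pr.1 = k) :
    (PySem.List.sorted items (fun x => x.2) true).find? (fun pr => p pr.1) = some (k, v) := by
  have hperm := PySem.List.sorted_perm items (fun x => x.2) true
  have hmemS : (k, v) ∈ PySem.List.sorted items (fun x => x.2) true := hperm.mem_iff.mpr hmem
  obtain ⟨l1, l2, hsplit⟩ := List.append_of_mem hmemS
  have hpair := PySem.List.sorted_pairwise_rev items (fun x => x.2)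
  rw [hsplit] at hpair
  have hge : ∀ y ∈ l1, v ≤ y.2 := by
    intro y hy
    have := (List.pairwise_append.mp hpair).2.2 y hy (k, v) (List.mem_cons_self ..)
    simpa using this
  have hnodS : ((l1 ++ (k, v) :: l2).map Prod.fst).Nodup := by
    rw [← hsplit]
    exact ((hperm.map Prod.fst).nodup_iff).mpr hnodup
  have hnone : l1.find? (fun pr => p pr.1) = none := by
    rw [List.find?_eq_none]
    intro y hy hpy
    have hyI : y ∈ items := hperm.mem_iff.mp (by rw [hsplit]; exact List.mem_append.mpr (Or.inl hy))
    have hpy' : p y.1 = true := by simpa using hpy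
    have h1 : y.2 ≤ v := hmax y hyI hpy'
    have h2 : v ≤ y.2 := hge y hy
    have h3 : y.1 = k := huniq y hyI hpy' (le_antisymm h1 h2)
    rw [List.map_append] at hnodS
    have hdisj := List.disjoint_of_nodup_append hnodS
    have hy1 : y.1 ∈ l1.map Prod.fst := List.mem_map_of_mem hy
    rw [h3] at hy1
    exact hdisj hy1 (by simp)
  rw [hsplit, List.find?_append, hnone, Option.none_or]
  rw [List.find?_cons_of_pos (by simpa using hp)]

theorem exists_max_nat (l : List String) (g : String → Nat) (h : l ≠ []) :
    ∃ k ∈ l, ∀ k' ∈ l, g k' ≤ g k := by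
  induction l with
  | nil => exact absurd rfl h
  | cons a t ih =>
    by_cases ht : t = []
    · subst ht
      exact ⟨a, List.mem_cons_self .., by intro k' hk'; simp at hk'; subst hk'; exact le_rfl⟩
    · obtain ⟨k, hk, hmax⟩ := ih ht
      rcases le_total (g k) (g a) with hle | hle
      · refine ⟨a, List.mem_cons_self .., ?_⟩
        intro k' hk'
        rcases List.mem_cons.mp hk' with rfl | hk'
        · exact le_rfl
        · exact le_trans (hmax k' hk') hle
      · refine ⟨k, List.mem_cons_of_mem a hk, ?_⟩
        intro k' hk'
        rcases List.mem_cons.mp hk' with rfl | hk'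
        · exact hle
        · exact hmax k' hk'

theorem countP_ge_two (p : String → Bool) (l : List String) (a b : String)
    (ha : a ∈ l) (hb : b ∈ l) (hab : a ≠ b) (hpa : p a = true) (hpb : p b = true) :
    2 ≤ l.countP p := by
  obtain ⟨s, t, rfl⟩ := List.append_of_mem ha
  rw [List.countP_append, List.countP_cons]
  rcases List.mem_append.mp hb with hbs | hbt
  · have hpos : 0 < s.countP p := List.countP_pos_iff.mpr ⟨b, hbs, hpb⟩
    simp [hpa]
    omega
  · rcases List.mem_cons.mp hbt with rfl | hbt
    · exact absurd rfl hab
    · have hpos : 0 < t.countP p := List.countP_pos_iff.mpr ⟨b, hbt, hpb⟩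
      simp [hpa]
      omega

-- ===== B-side sieve machinery (proof only) =====
theorem foldl_guard_filter {α β : Type} (P : β → Bool) (g : β → α → Bool) (l : List β) :
    ∀ (c : List α),
    l.foldl (fun cand q => if P q then cand.filter (g q) else cand) c
      = c.filter (fun w => l.all (fun q => !P q || g q w)) := by
  induction l with
  | nil => intro c; simp
  | cons q t ih =>
    intro c
    rw [List.foldl_cons]
    by_cases h : P q = true
    · rw [if_pos h, ih, List.filter_filter]
      apply List.filter_congr
      intro w _
      simp [h, Bool.and_comm]
    · rw [if_neg h, ih]
      apply List.filter_congr
      intro w _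
      rw [Bool.not_eq_true] at h
      simp [h]

theorem pos_bridge (pl w : List Char) (hw : w.length = pl.length) :
    (PySem.List.enumerate pl 0).all
        (fun q => !(q.2 != '_') || (PySem.List.pyGet? w q.1 == some q.2))
      = (pl.zip w).all (fun q => q.1 == '_' || q.1 == q.2) := by
  apply Bool.eq_iff_iff.mpr
  rw [List.all_eq_true, List.all_eq_true]
  constructor
  · intro h q hq
    rw [List.mem_iff_getElem] at hq
    obtain ⟨i, hi, hqi⟩ := hq
    rw [List.length_zip, hw, Nat.min_self] at hi
    rw [List.getElem_zip] at hqi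
    have := h ((0 : Int) + (i : Int), pl[i])
      ((PySem.List.mem_enumerate_iff pl 0 _).mpr ⟨i, hi, rfl⟩)
    simp only [zero_add, PySem.List.pyGet?_natCast] at this
    rw [List.getElem?_eq_getElem (by omega)] at this
    subst hqi
    simp only [Bool.or_eq_true, Bool.not_eq_eq_eq_not, Bool.not_true, bne_eq_false_iff_eq,
      beq_iff_eq, Option.some.injEq] at this ⊢
    rcases this with h1 | h1
    · exact Or.inl h1
    · exact Or.inr h1.symm
  · intro h q hq
    rcases (PySem.List.mem_enumerate_iff pl 0 q).mp hq with ⟨k, hk, hqk⟩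
    subst hqk
    have hmem : (pl[k], w[k]'(by omega)) ∈ pl.zip w := by
      rw [List.mem_iff_getElem]
      exact ⟨k, by rw [List.length_zip, hw, Nat.min_self]; exact hk, by rw [List.getElem_zip]⟩
    have := h _ hmem
    simp only [zero_add, PySem.List.pyGet?_natCast]
    rw [List.getElem?_eq_getElem (by omega)]
    simp only [Bool.or_eq_true, beq_iff_eq] at this
    simp only [Bool.or_eq_true, Bool.not_eq_eq_eq_not, Bool.not_true, bne_eq_false_iff_eq,
      beq_iff_eq, Option.some.injEq]
    rcases this with h1 | h1
    · exact Or.inl h1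
    · exact Or.inr h1.symm

theorem wrongB_mem_single (p : String) (u : List String) (c : Char) :
    (String.ofList [c] ∈ PySem.Set.diff
        (PySem.Set.ofList (u.filter (fun b => b.toList.length == 1)))
        (PySem.Set.ofList (p.toList.map (fun c => String.ofList [c]))))
      ↔ String.ofList [c] ∈ pvWrong p u := by
  rw [pvWrong, PySem.Set.mem_diff, PySem.Set.mem_diff, PySem.Set.mem_ofList, PySem.Set.mem_ofList,
    List.mem_filter]
  simp

theorem all_noany_eq (L : List String) (w : List Char) :
    L.all (fun bad => !(w.any (fun c => String.ofList [c] == bad)))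
      = !(w.any (fun c => L.contains (String.ofList [c]))) := by
  apply Bool.eq_iff_iff.mpr
  simp only [List.all_eq_true, Bool.not_eq_true', List.any_eq_false]
  constructor
  · intro h c hc
    cases h' : L.contains (String.ofList [c]) with
    | false => simp
    | true =>
      have hmem := List.contains_iff_mem.mp h'
      have := h _ hmem c hc
      simp at this
  · intro h bad hbad c hc
    cases h' : (String.ofList [c] == bad) with
    | false => simp
    | true =>
      have heq := beq_iff_eq.mp h'
      subst heq
      have := h c hc
      rw [List.contains_iff_mem.mpr hbad] at this
      exact absurd this (by simp)

theorem wrong_bridge (p : String) (u : List String) (w : List Char) :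
    (PySem.Set.diff
        (PySem.Set.ofList (u.filter (fun b => b.toList.length == 1)))
        (PySem.Set.ofList (p.toList.map (fun c => String.ofList [c])))).all
        (fun bad => !(w.any (fun c => String.ofList [c] == bad)))
      = !(w.any (fun c => List.contains (pvWrong p u) (String.ofList [c]))) := by
  rw [all_noany_eq]
  congr 1
  congr 1
  funext c
  exact contains_congr_mem _ (wrongB_mem_single p u c)

theorem B_candidates (p : String) (u : List String) (wl : List String) :
    (if u != ([] : List String) then
      (PySem.Set.diff
        (PySem.Set.ofList (u.filter (fun b => b.toList.length == 1)))
        (PySem.Set.ofList (p.toList.map (fun c => String.ofList [c])))).foldl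
        (fun cand bad => cand.filter (fun w => !(w.toList.any (fun c => String.ofList [c] == bad))))
        ((PySem.List.enumerate p.toList 0).foldl
          (fun cand q =>
            if q.2 != '_' then cand.filter (fun w => PySem.List.pyGet? w.toList q.1 == some q.2)
            else cand)
          (wl.filter (fun w => w.toList.length == p.toList.length)))
     else wl.filter (fun w => w.toList.length == p.toList.length))
    = wl.filter (fun w => pvProbable p u w) := by
  by_cases hu : u = []
  · subst hu
    rw [if_neg (by simp)]
    apply List.filter_congr
    intro w _
    rw [pvProbable]
    simp
  · have hu' : (u != ([] : List String)) = true := by simpa using hu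
    have hu2 : (u == ([] : List String)) = false := by simpa using hu
    rw [if_pos hu']
    rw [foldl_guard_filter]
    have hwrong := foldl_guard_filter (fun (_ : String) => true)
      (fun bad (w : String) => !(w.toList.any (fun c => String.ofList [c] == bad)))
      (PySem.Set.diff
        (PySem.Set.ofList (u.filter (fun b => b.toList.length == 1)))
        (PySem.Set.ofList (p.toList.map (fun c => String.ofList [c]))))
    have hshape : (fun (cand : List String) (bad : String) =>
        cand.filter (fun w => !(w.toList.any (fun c => String.ofList [c] == bad))))
        = (fun cand bad => if true then
            cand.filter (fun w => !(w.toList.any (fun c => String.ofList [c] == bad))) else cand) := by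
      funext cand bad
      rw [if_pos rfl]
    rw [hshape, hwrong, List.filter_filter, List.filter_filter]
    apply List.filter_congr
    intro w _
    rw [pvProbable, hu2]
    simp only [Bool.false_or]
    by_cases hlen : (w.toList.length == p.toList.length) = true
    · have hw : w.toList.length = p.toList.length := by simpa using hlen
      rw [hlen]
      simp only [Bool.not_true, Bool.false_or]
      rw [pos_bridge p.toList w.toList hw, wrong_bridge p u w.toList]
      simp [Bool.and_comm]
    · rw [Bool.not_eq_true] at hlen
      rw [hlen]
      simp

-- B's argmax scan: staying put when nothing beats the current best
theorem scan_keep (G : Char → Int) (t : List Char) :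
    ∀ (b : String × Int), (∀ c ∈ t, G c ≤ b.2) →
    t.foldl (fun best c =>
        match best with
        | none => some (String.ofList [c], G c)
        | some b => if G c > b.2 then some (String.ofList [c], G c) else best)
      (some b) = some b := by
  induction t with
  | nil => intro b _; rfl
  | cons c t ih =>
    intro b hb
    rw [List.foldl_cons]
    have hle : G c ≤ b.2 := hb c (List.mem_cons_self ..)
    simp only [if_neg (by omega : ¬ G c > b.2)]
    exact ih b (fun c' hc' => hb c' (List.mem_cons_of_mem c hc'))

theorem scan_argmax (G : Char → Int) (kc : Char) (l : List Char) :
    ∀ (acc : Option (String × Int)),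
    (acc = none ∨ ∃ b, acc = some b ∧ b.2 < G kc) → kc ∈ l →
    (∀ c ∈ l, G c ≤ G kc) → (∀ c ∈ l, G c = G kc → c = kc) →
    l.foldl (fun best c =>
        match best with
        | none => some (String.ofList [c], G c)
        | some b => if G c > b.2 then some (String.ofList [c], G c) else best)
      acc = some (String.ofList [kc], G kc) := by
  induction l with
  | nil => intro acc _ hk _ _; exact absurd hk (List.not_mem_nil)
  | cons c t ih =>
    intro acc hacc hk hmax huniq
    rw [List.foldl_cons]
    by_cases hc : c = kc
    · subst hc
      rcases hacc with rfl | ⟨b, rfl, hb⟩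
      · exact scan_keep G t (String.ofList [c], G c)
          (fun c' hc' => hmax c' (List.mem_cons_of_mem c hc'))
      · simp only [if_pos (by omega : G c > b.2)]
        exact scan_keep G t (String.ofList [c], G c)
          (fun c' hc' => hmax c' (List.mem_cons_of_mem c hc'))
    · have hkt : kc ∈ t := by
        rcases List.mem_cons.mp hk with rfl | h
        · exact absurd rfl hc
        · exact h
      have hlt : G c < G kc := by
        have hle := hmax c (List.mem_cons_self ..)
        rcases lt_or_eq_of_le hle with h | h
        · exact h
        · exact absurd (huniq c (List.mem_cons_self ..) h) hc
      apply ih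
      · rcases hacc with rfl | ⟨b, rfl, hb⟩
        · exact Or.inr ⟨(String.ofList [c], G c), rfl, hlt⟩
        · by_cases hgt : G c > b.2
          · simp only [if_pos hgt]
            exact Or.inr ⟨(String.ofList [c], G c), rfl, hlt⟩
          · simp only [if_neg hgt]
            exact Or.inr ⟨b, rfl, hb⟩
      · exact hkt
      · exact fun c' hc' => hmax c' (List.mem_cons_of_mem c hc')
      · exact fun c' hc' h => huniq c' (List.mem_cons_of_mem c hc') h

-- the two selection phases agree when the maximum is unique
theorem select_eq (u : List String) (pws : List String)
    (hpre : (pvCs u pws).countP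
      (fun s => (pvCs u pws).all (fun s' => pvCnt pws s' ≤ pvCnt pws s)) ≤ 1) :
    (PySem.List.sorted (pvCdict pvLA pws).items (fun x => x.2) true).foldl
        (fun r i => r.or (if !(u.contains i.1) then some i.1 else none)) none
      = (match
          (PySem.List.dedup (pws.flatMap (fun w => w.toList))).foldl
            (fun best c =>
              if u.contains (String.ofList [c]) then best
              else
                match best with
                | none => some (String.ofList [c],
                    ((pws.countP (fun w => w.toList.contains c) : Nat) : Int))
                | some b =>
                    if ((pws.countP (fun w => w.toList.contains c) : Nat) : Int) > b.2
                    then some (String.ofList [c],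
                      ((pws.countP (fun w => w.toList.contains c) : Nat) : Int))
                    else best)
            none with
        | some b => some b.1
        | none => none) := by
  rw [scan_or, Option.none_or]
  -- B's scan: hide the used letters behind a filter, then show G is pvCnt
  set order := PySem.List.dedup (pws.flatMap (fun w => w.toList)) with horder
  set G : Char → Int := fun c => ((pvCnt pws (String.ofList [c]) : Nat) : Int) with hG
  have hGport : ∀ c, ((pws.countP (fun w => w.toList.contains c) : Nat) : Int) = G c := by
    intro c
    simp only [hG]
    have hcnt : pws.countP (fun w => w.toList.contains c) = pvCnt pws (String.ofList [c]) := by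
      rw [pvCnt]
      apply List.countP_congr
      intro w _
      rw [pvLetters, contains_map_single]
    rw [hcnt]
  have hswap : (fun (best : Option (String × Int)) (c : Char) =>
      if u.contains (String.ofList [c]) then best
      else
        match best with
        | none => some (String.ofList [c], ((pws.countP (fun w => w.toList.contains c) : Nat) : Int))
        | some b =>
            if ((pws.countP (fun w => w.toList.contains c) : Nat) : Int) > b.2
            then some (String.ofList [c], ((pws.countP (fun w => w.toList.contains c) : Nat) : Int))
            else best)
      = (fun best c =>
          if !(u.contains (String.ofList [c])) then
            (match best with
             | none => some (String.ofList [c], G c)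
             | some b => if G c > b.2 then some (String.ofList [c], G c) else best)
          else best) := by
    funext best c
    rw [hGport]
    cases h : u.contains (String.ofList [c])
    · simp
    · simp

  rw [hswap, PySem.List.foldl_if_eq_foldl_filter]
  set l' := order.filter (fun c => !(u.contains (String.ofList [c]))) with hl'
  -- pvCs is exactly l' rendered as one-character strings
  have hS : pvCs u pws = l'.map (fun c => String.ofList [c]) := by
    rw [pvCs, hl', horder]
    have h1 : pws.flatMap (fun w => pvLetters w)
        = (pws.flatMap (fun w => w.toList)).map (fun c => String.ofList [c]) := by
      rw [List.map_flatMap]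
      rfl
    rw [h1]
    have h2 : PySem.List.dedup ((pws.flatMap (fun w => w.toList)).map (fun c => String.ofList [c]))
        = (PySem.List.dedup (pws.flatMap (fun w => w.toList))).map (fun c => String.ofList [c]) := by
      rw [PySem.List.dedup_eq_ofList, ofList_map_single]
    rw [h2, List.filter_map]
    rfl
  -- facts about A's counting dict
  have hvalA : ∀ k, (pvCdict pvLA pws).getD k 0 = ((pvCnt pws k : Nat) : Int) := by
    intro k
    rw [pvCdict, cdict_getD pvLA nodup_pvLA pws PySem.Dict.empty k]
    have h0 : (PySem.Dict.empty : PySem.Dict String Int).getD k 0 = 0 := by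
      simp [PySem.Dict.getD, PySem.Dict.get?_empty]
    rw [h0, pvCnt, List.countP_congr (fun w _ => by
      rw [contains_congr_mem k (mem_pvLA w k)])]
    omega
  have hkeyA : ∀ k, (k ∈ (pvCdict pvLA pws).keys ↔ ∃ w ∈ pws, k ∈ pvLetters w) := by
    intro k
    rw [pvCdict, cdict_mem_keys pvLA pws PySem.Dict.empty k, PySem.Dict.keys_empty]
    simp only [List.not_mem_nil, false_or]
    constructor
    · rintro ⟨w, hw, hk⟩; exact ⟨w, hw, (mem_pvLA w k).mp hk⟩
    · rintro ⟨w, hw, hk⟩; exact ⟨w, hw, (mem_pvLA w k).mpr hk⟩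
  have hnodA : (pvCdict pvLA pws).keys.Nodup :=
    cdict_nodup_keys pvLA pws PySem.Dict.empty (by rw [PySem.Dict.keys_empty]; exact List.nodup_nil)
  have hcs : ∀ k, k ∈ pvCs u pws ↔ ((∃ w ∈ pws, k ∈ pvLetters w) ∧ u.contains k = false) := by
    intro k
    rw [pvCs, List.mem_filter, PySem.List.dedup_eq_ofList, PySem.Set.mem_ofList, List.mem_flatMap]
    simp
  have hitemval : ∀ pr ∈ (pvCdict pvLA pws).items, pr.2 = ((pvCnt pws pr.1 : Nat) : Int) := by
    intro pr hpr
    have := PySem.Dict.getD_of_mem_items (pvCdict pvLA pws) (k := pr.1) (v := pr.2)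
      (by simpa using hpr) hnodA 0
    rw [← this, hvalA]
  have hmemitem : ∀ k, k ∈ (pvCdict pvLA pws).keys →
      (k, ((pvCnt pws k : Nat) : Int)) ∈ (pvCdict pvLA pws).items := by
    intro k hk
    cases hg : (pvCdict pvLA pws).get? k with
    | none => exact absurd hk ((PySem.Dict.get?_eq_none_iff_not_mem_keys (pvCdict pvLA pws) k).mp hg)
    | some x =>
      have hx : x = ((pvCnt pws k : Nat) : Int) := by
        have := hvalA k
        rw [PySem.Dict.getD_eq_get?_getD, hg] at this
        simpa using this
      rw [← hx]
      exact PySem.Dict.mem_items_of_get?_eq_some (pvCdict pvLA pws) hg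
  by_cases hcs0 : pvCs u pws = []
  · -- no candidate letter: A's find fails, B's scan never starts
    have hl0 : l' = [] := by
      have := hS
      rw [hcs0] at this
      exact List.map_eq_nil_iff.mp this.symm
    rw [hl0]
    have hnoneq : ∀ pr ∈ (pvCdict pvLA pws).items, (!(u.contains pr.1)) = false := by
      intro pr hpr
      by_contra hne
      have hb : u.contains pr.1 = false := by
        rcases Bool.eq_false_or_eq_true (u.contains pr.1) with h | h
        · rw [h] at hne; simp at hne
        · exact h
      have : pr.1 ∈ pvCs u pws :=
        (hcs pr.1).mpr ⟨(hkeyA pr.1).mp (PySem.Dict.mem_keys_of_mem_items (pvCdict pvLA pws) hpr), hb⟩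
      rw [hcs0] at this
      exact absurd this (List.not_mem_nil)
    rw [find_sorted_none _ _ hnoneq]
    rfl
  · obtain ⟨ks, hks, hksmax⟩ := exists_max_nat (pvCs u pws) (pvCnt pws) hcs0
    have hmaxpred : (pvCs u pws).all (fun s' => pvCnt pws s' ≤ pvCnt pws ks) = true := by
      rw [List.all_eq_true]
      intro s' hs'
      simpa using hksmax s' hs'
    have huniqcs : ∀ k', k' ∈ pvCs u pws → pvCnt pws k' = pvCnt pws ks → k' = ks := by
      intro k' hk' heq
      by_contra hne
      have hmax' : (pvCs u pws).all (fun s' => pvCnt pws s' ≤ pvCnt pws k') = true := by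
        rw [List.all_eq_true]
        intro s' hs'
        simpa [heq] using hksmax s' hs'
      have := countP_ge_two
        (fun s => (pvCs u pws).all (fun s' => pvCnt pws s' ≤ pvCnt pws s))
        (pvCs u pws) k' ks hk' hks hne hmax' hmaxpred
      omega
    -- the unique best letter, as a character
    obtain ⟨kc, hkc, hkceq⟩ := List.mem_map.mp (hS ▸ hks)
    have hkcs := (hcs ks).mp hks
    -- A's side finds exactly (ks, its count)
    have hfind : (PySem.List.sorted (pvCdict pvLA pws).items (fun x => x.2) true).find?
        (fun pr => !(u.contains pr.1)) = some (ks, ((pvCnt pws ks : Nat) : Int)) := by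
      apply find_sorted_max (fun k => !(u.contains k)) (pvCdict pvLA pws).items
        (by rw [show (pvCdict pvLA pws).items.map Prod.fst = (pvCdict pvLA pws).keys from rfl]; exact hnodA)
      · exact hmemitem ks ((hkeyA ks).mpr hkcs.1)
      · show (!(u.contains ks)) = true
        rw [hkcs.2]
        rfl
      · intro pr hpr hppr
        rw [hitemval pr hpr]
        have hprcs : pr.1 ∈ pvCs u pws := by
          apply (hcs pr.1).mpr
          refine ⟨(hkeyA pr.1).mp (PySem.Dict.mem_keys_of_mem_items (pvCdict pvLA pws) hpr), ?_⟩
          rcases Bool.eq_false_or_eq_true (u.contains pr.1) with h | h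
          · rw [h] at hppr; simp at hppr
          · exact h
        exact_mod_cast hksmax pr.1 hprcs
      · intro pr hpr hppr heq
        have hprv := hitemval pr hpr
        have hprcs : pr.1 ∈ pvCs u pws := by
          apply (hcs pr.1).mpr
          refine ⟨(hkeyA pr.1).mp (PySem.Dict.mem_keys_of_mem_items (pvCdict pvLA pws) hpr), ?_⟩
          rcases Bool.eq_false_or_eq_true (u.contains pr.1) with h | h
          · rw [h] at hppr; simp at hppr
          · exact h
        apply huniqcs pr.1 hprcs
        have : ((pvCnt pws pr.1 : Nat) : Int) = ((pvCnt pws ks : Nat) : Int) := by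
          rw [← hprv, heq]
        exact_mod_cast this
    rw [hfind]
    -- B's side scans to the same letter
    have hkceq' : String.ofList [kc] = ks := hkceq
    have hGks : G kc = ((pvCnt pws ks : Nat) : Int) := by
      simp only [hG]
      rw [hkceq']
    have hscan : l'.foldl (fun best c =>
        match best with
        | none => some (String.ofList [c], G c)
        | some b => if G c > b.2 then some (String.ofList [c], G c) else best)
      none = some (String.ofList [kc], G kc) := by
      apply scan_argmax G kc l' none (Or.inl rfl) hkc
      · intro c hc
        have hcS : String.ofList [c] ∈ pvCs u pws := by
          rw [hS]
          exact List.mem_map_of_mem hc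
        have := hksmax _ hcS
        simp only [hG]
        rw [hkceq']
        exact_mod_cast this
      · intro c hc hGc
        have hcS : String.ofList [c] ∈ pvCs u pws := by
          rw [hS]
          exact List.mem_map_of_mem hc
        have hcnt : pvCnt pws (String.ofList [c]) = pvCnt pws ks := by
          simp only [hG] at hGc
          rw [hkceq'] at hGc
          exact_mod_cast hGc
        have := huniqcs _ hcS hcnt
        rw [← hkceq'] at this
        exact ofList_single_inj this
    rw [hscan, hkceq']
    rfl

theorem probable_bridge (p : String) (u : List String) (w : String) :
    (if w.toList.length != p.toList.length then false
     else if u == ([] : List String) then true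
     else (p.toList.zip w.toList).all (fun q => q.1 == '_' || q.1 == q.2)
       && !(w.toList.any (fun c => List.contains (pvWrong p u) (String.ofList [c]))))
    = pvProbable p u w := by
  rw [pvProbable]
  by_cases hlen : (w.toList.length == p.toList.length) = true
  · have hlen' : (w.toList.length != p.toList.length) = false := by
      simp only [bne]
      rw [hlen]
      rfl
    rw [if_neg (by rw [hlen']; simp), hlen, Bool.true_and]
    by_cases hu : (u == ([] : List String)) = true
    · rw [if_pos hu, hu, Bool.true_or]
    · rw [if_neg hu]
      rw [Bool.not_eq_true] at hu
      rw [hu, Bool.false_or]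
  · rw [Bool.not_eq_true] at hlen
    have hlen' : (w.toList.length != p.toList.length) = true := by
      simp only [bne]
      rw [hlen]
      rfl
    rw [if_pos hlen', hlen, Bool.false_and]

theorem ports_eq (p : String) (u : List String) (wl : List String)
    (hpre : Pre_guess_next_letter p u wl) :
    guess_next_letter p u wl = guess_next_letter_alt p u wl := by
  unfold guess_next_letter guess_next_letter_alt
  simp only []
  set pl := p.toList with hpl
  set wr := PySem.Set.diff (PySem.Set.ofList u) (PySem.Set.ofList (pl.map (fun c => String.ofList [c]))) with hwr
  set D := (PySem.List.enumerate pl 0).foldl (fun d q => if q.2 != '_' then d.insert q.1 q.2 else d) PySem.Dict.empty with hD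
  set pB := fun word : String =>
    if word.toList.length != pl.length then false
    else if u == ([] : List String) then true
    else (pl.zip word.toList).all (fun q => q.1 == '_' || q.1 == q.2)
      && !(word.toList.any (fun c => List.contains wr (String.ofList [c]))) with hpB
  have hget : ∀ i : Int, D.get? i = pgets pl 0 i := by
    intro i
    rw [hD, dict_get_eq_pgets pl 0 PySem.Dict.empty i]
    simp [PySem.Dict.empty, PySem.Dict.get?]
  have hbody : (fun (acc : List String) (word : String) =>
      if word.toList.length == pl.length then
        if u == ([] : List String) then acc ++ [word]
        else
          if ((PySem.List.enumerate word.toList 0).foldl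
              (fun n q =>
                if List.contains wr (String.ofList [q.2])
                  then (if D.get? q.1 == some q.2 then n + 1 else n) - 1
                  else (if D.get? q.1 == some q.2 then n + 1 else n)) (0 : Int))
              == (D.size : Int) then acc ++ [word] else acc
      else acc)
      = fun acc word => if pB word then acc ++ [word] else acc := by
    funext acc word
    by_cases hlen : (word.toList.length == pl.length) = true
    · have hlen' : (word.toList.length != pl.length) = false := by
        simp only [bne, hlen, Bool.not_true]
      rw [if_pos hlen, hpB]
      simp only [hlen', Bool.false_eq_true, if_false]
      by_cases hu : (u == ([] : List String)) = true
      · rw [if_pos hu, if_pos hu, if_pos rfl]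
      · rw [if_neg hu, if_neg hu]
        have hw : word.toList.length = pl.length := by simpa using hlen
        have hcond :
            (((PySem.List.enumerate word.toList 0).foldl
              (fun n q =>
                if List.contains wr (String.ofList [q.2])
                  then (if D.get? q.1 == some q.2 then n + 1 else n) - 1
                  else (if D.get? q.1 == some q.2 then n + 1 else n)) (0 : Int))
              == (D.size : Int))
            = ((pl.zip word.toList).all (fun q => q.1 == '_' || q.1 == q.2)
                && !(word.toList.any (fun c => List.contains wr (String.ofList [c])))) := by
          rw [cnt_fold_eq D wr word.toList 0 0]
          have hZ : (PySem.List.enumerate word.toList 0).countP (fun q => D.get? q.1 == some q.2)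
              = (pl.zip word.toList).countP (fun q => q.1 != '_' && q.1 == q.2) := by
            rw [List.countP_congr (fun x _ => by rw [hget x.1]),
              count_match_eq pl word.toList 0 hw]
          have hS : D.size = pl.countP (fun c => c != '_') := by
            rw [hD]
            have := dict_size_eq pl 0 PySem.Dict.empty (by intro q hq; simp [PySem.Dict.empty] at hq)
            simpa using this
          have hle := zip_count_le pl word.toList
          have hiff := zip_count_eq_iff pl word.toList hw
          have hWany : (word.toList.countP (fun c => List.contains wr (String.ofList [c])) = 0)
              ↔ ((word.toList.any (fun c => List.contains wr (String.ofList [c]))) = false) := by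
            simp [List.countP_eq_zero, List.any_eq_false]
          rw [hZ, hS]
          apply Bool.eq_iff_iff.mpr
          simp only [beq_iff_eq, Bool.and_eq_true, Bool.not_eq_true']
          rw [← hiff, ← hWany]
          omega
        rw [hcond]
    · have hlen' : (word.toList.length != pl.length) = true := by
        simp only [bne, Bool.not_eq_true']
        rw [Bool.not_eq_true] at hlen
        exact hlen
      rw [if_neg hlen, hpB]
      simp only [hlen', if_true, Bool.false_eq_true, if_false]
  rw [hbody]
  have hfold := PySem.List.foldl_append_if pB (fun w : String => w) wl []
  simp only [List.map_id', List.nil_append] at hfold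
  rw [hfold, length_beq_zero]
  have hFeq : wl.filter pB = wl.filter (fun w => pvProbable p u w) := by
    apply List.filter_congr
    intro w _
    rw [hpB]
    show (if w.toList.length != pl.length then false
      else if u == ([] : List String) then true
      else (pl.zip w.toList).all (fun q => q.1 == '_' || q.1 == q.2)
        && !(w.toList.any (fun c => List.contains wr (String.ofList [c])))) = pvProbable p u w
    have hwrw : wr = pvWrong p u := by rw [hwr]; rfl
    rw [hwrw]
    exact probable_bridge p u w
  rw [hFeq, B_candidates p u wl]
  set pws := wl.filter (fun w => pvProbable p u w) with hpws
  by_cases hnil : (pws == ([] : List String)) = true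
  · rw [if_pos hnil, if_pos hnil]
  · rw [if_neg hnil, if_neg hnil]
    simp only [ofList_map_single, counts_body_eq, set_contains_ofList]
    have hpre' : (pvCs u pws).countP
        (fun s => (pvCs u pws).all (fun s' => pvCnt pws s' ≤ pvCnt pws s)) ≤ 1 := hpre
    have := select_eq u pws hpre'
    rw [pvCdict] at this
    simp only [pvLA] at this
    exact this

-- ===== VERDICT (by name: the statement is the Claim_ definition above) =====
theorem guess_next_letter_spec : Claim_equal_guess_next_letter := by
  intro partten used_letters word_list _ hpre
  unfold Spec_guess_next_letter
  exact ports_eq partten used_letters word_list hpre
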